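-- pv_equiv track=rewrite | github.com/exness/userver | scripts/proto_structs/models/names.py | to_upper_case
-- ===== SOURCE A (Python) =====
-- def to_upper_case(name: str) -> str:
--     """Converts a `snake_case`, `camelCase`, `PascalCase` or `UPPER_CASE` identifier to `UPPER_CASE`."""
--     if name.isupper():
--         return name
--     result = ''
--     for i, char in enumerate(name):
--         if char.isupper() and i > 0:
--             result += '_'
--         result += char
--     return result.upper()
-- ===== SOURCE B (Python) =====
-- def to_upper_case(name: str) -> str:
--     """Converts a `snake_case`, `camelCase`, `PascalCase` or `UPPER_CASE` identifier to `UPPER_CASE`."""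
--     if name.isupper():
--         return name
--     parts = ['']
--     for ch in reversed(name):
--         parts[0] = ch + parts[0]
--         if ch.isupper():
--             parts.insert(0, '')
--     if parts[0] == '':
--         parts.pop(0)
--     return '_'.join(parts).upper()
-- ===== Notes on version B (the rewrite author's own statement) =====
-- stated objective: alternative
-- what changed: B walks the string in reverse building a list of parts that are split before each uppercase letter, then upper-cases the underscore-join of those parts, instead of A's forward per-character loop that appends an underscore before every non-initial uppercase character.
import Mathlib
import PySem

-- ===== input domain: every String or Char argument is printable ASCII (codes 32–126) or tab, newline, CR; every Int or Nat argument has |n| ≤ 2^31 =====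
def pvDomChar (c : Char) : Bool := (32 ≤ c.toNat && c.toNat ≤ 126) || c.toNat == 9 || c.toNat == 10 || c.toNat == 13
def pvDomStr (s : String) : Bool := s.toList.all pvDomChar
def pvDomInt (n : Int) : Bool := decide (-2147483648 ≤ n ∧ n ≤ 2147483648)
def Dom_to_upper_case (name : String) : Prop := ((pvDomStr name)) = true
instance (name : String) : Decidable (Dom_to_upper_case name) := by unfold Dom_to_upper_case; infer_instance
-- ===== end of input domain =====

-- B rebuilds the string as '_'-joined parts split before each uppercase letter (reverse pass),
-- instead of A's per-character underscore emission; objective: alternative decomposition, same cost.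

-- ===== PORT A =====
-- Python str.isupper(): at least one cased character and no lowercase one; on the ASCII
-- domain the cased characters are exactly the letters, so this is exact there.
def pvStrIsupper (cs : List Char) : Bool :=
  cs.any (fun c => PySem.Chars.isalpha c) && !cs.any (fun c => PySem.Chars.islower c)

def to_upper_case (name : String) : String :=
  if pvStrIsupper name.toList then name
  else
    let result := (PySem.List.enumerate name.toList 0).foldl
      (fun result ic =>
        (if PySem.Chars.isupper ic.2 && decide (0 < ic.1) then result ++ ['_'] else result) ++ [ic.2])
      []
    String.ofList (PySem.Chars.upper result)

-- ===== PORT B =====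
def to_upper_case_alt (name : String) : String :=
  if pvStrIsupper name.toList then name
  else
    let parts := name.toList.reverse.foldl
      (fun parts ch =>
        let parts' : List (List Char) :=
          match parts with
          | p :: rest => (ch :: p) :: rest
          | [] => [[ch]]
        if PySem.Chars.isupper ch then [] :: parts' else parts')
      [[]]
    let parts' := match parts with
      | [] :: rest => rest
      | _ => parts
    String.ofList (PySem.Chars.upper (PySem.Chars.join ['_'] parts'))

-- ===== PRECONDITION & SPEC =====
def Spec_to_upper_case (name : String) (out : String) : Prop := out = to_upper_case_alt name
instance (name : String) (out : String) : Decidable (Spec_to_upper_case name out) := by unfold Spec_to_upper_case; infer_instance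

-- ===== CLAIM (what is proved, stated in full; the proofs are below) =====
def Claim_equal_to_upper_case : Prop := ∀ (name : String), Dom_to_upper_case name → Spec_to_upper_case name (to_upper_case name)

-- ===== LEMMAS AND PROOFS =====

-- per-character emission for a non-initial character
def pvEmit (c : Char) : List Char :=
  (if PySem.Chars.isupper c then ['_'] else []) ++ [c]

-- the common value both loops compute (before .upper())
def pvSpecList : List Char → List Char
  | [] => []
  | c :: rest => c :: rest.flatMap pvEmit

-- B's loop body, as a foldr step (the port folds over the reversed list)
def pvStep (ch : Char) (parts : List (List Char)) : List (List Char) :=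
  let parts' : List (List Char) :=
    match parts with
    | p :: rest => (ch :: p) :: rest
    | [] => [[ch]]
  if PySem.Chars.isupper ch then [] :: parts' else parts'

theorem pvJoin_cons_head (s p : List Char) (c : Char) (ps : List (List Char)) :
    PySem.Chars.join s ((c :: p) :: ps) = c :: PySem.Chars.join s (p :: ps) := by
  cases ps with
  | nil => simp [PySem.Chars.join_singleton]
  | cons q qs => simp [PySem.Chars.join_cons_cons]

theorem pvFoldr_step (cs : List Char) :
    ∃ p ps, cs.foldr pvStep [[]] = p :: ps ∧
      PySem.Chars.join ['_'] (p :: ps) = cs.flatMap pvEmit := by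
  induction cs with
  | nil => exact ⟨[], [], rfl, by simp [PySem.Chars.join_singleton]⟩
  | cons c rest ih =>
    obtain ⟨p, ps, hP, hJ⟩ := ih
    by_cases hc : PySem.Chars.isupper c = true
    · refine ⟨[], (c :: p) :: ps, ?_, ?_⟩
      · simp [List.foldr, hP, pvStep, hc]
      · rw [PySem.Chars.join_cons_cons, pvJoin_cons_head, hJ]
        simp [pvEmit, hc]
    · refine ⟨c :: p, ps, ?_, ?_⟩
      · simp [List.foldr, hP, pvStep, hc]
      · rw [pvJoin_cons_head, hJ]
        simp [pvEmit, hc]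

-- B's result list equals the common spec list
theorem pvB_list (cs : List Char) :
    PySem.Chars.join ['_']
      (match cs.foldr pvStep [[]] with
        | [] :: rest => rest
        | parts => parts) = pvSpecList cs := by
  cases cs with
  | nil => simp [List.foldr, PySem.Chars.join_nil, pvSpecList]
  | cons c rest =>
    obtain ⟨p, ps, hP, hJ⟩ := pvFoldr_step rest
    by_cases hc : PySem.Chars.isupper c = true
    · have : (c :: rest).foldr pvStep [[]] = [] :: (c :: p) :: ps := by
        simp [List.foldr, hP, pvStep, hc]
      rw [this]
      simp only [pvSpecList]
      rw [pvJoin_cons_head, hJ]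
    · have : (c :: rest).foldr pvStep [[]] = (c :: p) :: ps := by
        simp [List.foldr, hP, pvStep, hc]
      rw [this]
      simp only [pvSpecList]
      rw [pvJoin_cons_head, hJ]

-- A's emission for the characters after the first (index ≥ 1)
theorem pvA_tail (rest : List Char) (s : Int) (hs : 1 ≤ s) :
    (PySem.List.enumerate rest s).flatMap
        (fun ic => (if PySem.Chars.isupper ic.2 && decide (0 < ic.1) then ['_'] else []) ++ [ic.2])
      = rest.flatMap pvEmit := by
  induction rest generalizing s with
  | nil => simp [PySem.List.enumerate_nil]
  | cons c rest ih =>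
    rw [PySem.List.enumerate_cons]
    simp only [List.flatMap_cons]
    rw [ih (s + 1) (by omega)]
    have h0 : decide ((0 : Int) < s) = true := by simp; omega
    simp [pvEmit, h0]

-- A's result list equals the common spec list
theorem pvA_list (cs : List Char) :
    (PySem.List.enumerate cs 0).foldl
        (fun result ic =>
          (if PySem.Chars.isupper ic.2 && decide (0 < ic.1) then result ++ ['_'] else result) ++ [ic.2])
        []
      = pvSpecList cs := by
  have hbody : (fun (result : List Char) (ic : Int × Char) =>
      (if PySem.Chars.isupper ic.2 && decide (0 < ic.1) then result ++ ['_'] else result) ++ [ic.2])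
      = (fun result ic =>
      result ++ ((if PySem.Chars.isupper ic.2 && decide (0 < ic.1) then ['_'] else []) ++ [ic.2])) := by
    funext result ic
    split_ifs <;> simp
  rw [hbody, PySem.List.foldl_append_eq_flatMap]
  cases cs with
  | nil => simp [PySem.List.enumerate_nil, pvSpecList]
  | cons c rest =>
    rw [PySem.List.enumerate_cons]
    simp only [List.flatMap_cons, List.nil_append]
    rw [show ((0:Int)+1) = 1 from rfl, pvA_tail rest 1 le_rfl]
    simp [pvSpecList]

-- ===== VERDICT (by name: the statement is the Claim_ definition above) =====
theorem to_upper_case_spec : Claim_equal_to_upper_case := by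
  intro name _
  unfold Spec_to_upper_case to_upper_case to_upper_case_alt
  by_cases h : pvStrIsupper name.toList = true
  · simp [h]
  · simp only [h, if_false, Bool.false_eq_true]
    rw [pvA_list]
    rw [List.foldl_reverse]
    rw [show (fun (x : Char) (y : List (List Char)) =>
        (fun (parts : List (List Char)) (ch : Char) =>
          let parts' : List (List Char) :=
            match parts with
            | p :: rest => (ch :: p) :: rest
            | [] => [[ch]]
          if PySem.Chars.isupper ch then [] :: parts' else parts') y x) = pvStep from rfl]
    rw [← pvB_list name.toList]
    congr 2
    cases hL : List.foldr pvStep [[]] name.toList with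
    | nil => rfl
    | cons p ps =>
      cases p with
      | nil => rfl
      | cons a b => rfl
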